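-- pv_equiv track=rewrite | github.com/qaz027/zzPractice | ProcessingArrays.py | return_text_message
-- ===== SOURCE A (Python) =====
-- def return_text_message(arr, text):
--
--     total = arr[0] - 3
--     if total < 0:
--         total = total * -1
--     abs_diff = 0
--     i = 0
--     msg = ''
--
--     while total < 30:
--         if text[i].islower():
--             if text[i] == 'z':
--                 msg += 'z'
--             else:
--                 msg += chr(ord(text[i])+1)
--         else:
--             msg += text[i]
--
--         i+= 1
--
--         abs_diff = arr[i] - 3
--         if abs_diff < 0:
--             abs_diff = abs_diff * -1
--
--         total += abs_diff
--
--
--     return (msg, arr[i:])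
-- ===== SOURCE B (Python) =====
-- def return_text_message(arr, text):
--     # Pass 1: find the stopping index n by summing absolute diffs to 30.
--     total = abs(arr[0] - 3)
--     n = 0
--     while total < 30:
--         n += 1
--         total += abs(arr[n] - 3)
--     # Pass 2: build the transformed message from the first n characters.
--     parts = []
--     for j in range(n):
--         c = text[j]
--         if c.islower():
--             parts.append('z' if c == 'z' else chr(ord(c) + 1))
--         else:
--             parts.append(c)
--     return (''.join(parts), arr[n:])
-- ===== Notes on version B (the rewrite author's own statement) =====
-- stated objective: simpler
-- what changed: Splits A's single intertwined loop into two passes: a pure counting loop over arr that finds the stopping index n, then a separate indexed pass over text building the message with a parts list joined once.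
import Mathlib
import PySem

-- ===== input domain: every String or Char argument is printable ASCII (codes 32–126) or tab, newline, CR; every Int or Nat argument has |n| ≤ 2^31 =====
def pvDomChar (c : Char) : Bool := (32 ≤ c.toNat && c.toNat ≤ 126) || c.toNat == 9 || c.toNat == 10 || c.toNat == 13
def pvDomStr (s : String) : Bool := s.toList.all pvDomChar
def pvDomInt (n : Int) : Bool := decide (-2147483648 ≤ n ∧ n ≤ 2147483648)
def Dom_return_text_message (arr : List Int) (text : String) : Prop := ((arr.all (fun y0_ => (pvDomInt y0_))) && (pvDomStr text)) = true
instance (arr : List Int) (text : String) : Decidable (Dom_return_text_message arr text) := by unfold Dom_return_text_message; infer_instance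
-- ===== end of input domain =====

-- B splits A's single intertwined loop into two passes (a pure counting loop over arr,
-- then an indexed message-building pass over text): objective 'simpler'; same return value on Pre_.

-- ===== PORT A =====
-- the character transform shared by both Pythons (islower / 'z' guard / chr(ord+1))
def pvTc (c : Char) : Char :=
  if PySem.Chars.islower c then
    (if c = 'z' then 'z' else Char.ofNat (c.toNat + 1))
  else c

-- A's while-loop; fuel bounds the recursion (arr.length suffices on Pre_);
-- the 'none' branches are where Python raises IndexError (outside Pre_).
def pvLoopA (arr : List Int) (tl : List Char) : Nat → Int → Nat → List Char → String × List Int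
  | 0, _, i, msg => (String.ofList msg, arr.drop i)
  | fuel+1, total, i, msg =>
    if total < 30 then
      match tl[i]?, arr[i+1]? with
      | some c, some a =>
          let d := a - 3
          let d := if d < 0 then d * -1 else d
          pvLoopA arr tl fuel (total + d) (i+1) (msg ++ [pvTc c])
      | _, _ => (String.ofList msg, arr.drop i)
    else (String.ofList msg, arr.drop i)

def return_text_message (arr : List Int) (text : String) : String × List Int :=
  match arr[0]? with
  | none => ("", arr)   -- Python raises IndexError here (outside Pre_)
  | some a0 =>
      let t := a0 - 3
      let t := if t < 0 then t * -1 else t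
      pvLoopA arr text.toList arr.length t 0 []

-- ===== PORT B =====
-- B's pass 1: the counting loop (n is the stopping index); 'none' = Python IndexError
def pvCountB (arr : List Int) : Nat → Int → Nat → Nat
  | 0, _, n => n
  | fuel+1, total, n =>
    if total < 30 then
      match arr[n+1]? with
      | some a => pvCountB arr fuel (total + |a - 3|) (n+1)
      | none => n
    else n

def return_text_message_alt (arr : List Int) (text : String) : String × List Int :=
  match arr[0]? with
  | none => ("", arr)   -- Python raises IndexError here (outside Pre_)
  | some a0 =>
      let n := pvCountB arr arr.length (|a0 - 3|) 0
      -- pass 2: indexed loop over text; text[j] missing = Python IndexError (outside Pre_)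
      let parts := (List.range n).map (fun j =>
        match text.toList[j]? with
        | some c => pvTc c
        | none => ' ')
      (String.ofList parts, arr.drop n)

-- ===== PRECONDITION & SPEC =====
-- prefix sum of the absolute diffs
def pvS (arr : List Int) (k : Nat) : Int := ((arr.take k).map (fun a => |a - 3|)).sum

-- Pre_ = exactly the inputs on which A returns (no IndexError): there is a stopping
-- index n (first prefix-sum of |arr[j]-3| reaching 30) with n < arr.length and n ≤ text.length.
def Pre_return_text_message (arr : List Int) (text : String) : Prop :=
  ∃ n < arr.length, n ≤ text.length ∧ 30 ≤ pvS arr (n+1) ∧ ∀ m < n, pvS arr (m+1) < 30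
instance (arr : List Int) (text : String) : Decidable (Pre_return_text_message arr text) := by
  unfold Pre_return_text_message; infer_instance

def pvWitness_return_text_message : List Int × String := ([100], "")

def Spec_return_text_message (arr : List Int) (text : String) (out : String × List Int) : Prop := out = return_text_message_alt arr text
instance (arr : List Int) (text : String) (out : String × List Int) : Decidable (Spec_return_text_message arr text out) := by unfold Spec_return_text_message; infer_instance

-- ===== CLAIM (what is proved, stated in full; the proofs are below) =====
def Claim_equal_return_text_message : Prop := ∀ (arr : List Int) (text : String), Dom_return_text_message arr text → Pre_return_text_message arr text → Spec_return_text_message arr text (return_text_message arr text)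

-- ===== LEMMAS AND PROOFS =====

theorem pvS_succ (arr : List Int) (k : Nat) (hk : k < arr.length) :
    pvS arr (k+1) = pvS arr k + |arr[k] - 3| := by
  unfold pvS
  rw [List.map_take, List.map_take,
    List.sum_take_succ (arr.map (fun a => |a - 3|)) k (by simpa using hk)]
  simp [List.getElem_map]

theorem pvAbs_eq (a : Int) : (if a - 3 < 0 then (a - 3) * -1 else a - 3) = |a - 3| := by
  split
  · rw [abs_of_neg (by omega)]; ring
  · rw [abs_of_nonneg (by omega)]

-- A's loop, under the invariant total = pvS (i+1), produces the transformed window text[i:n]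
theorem pvLoopA_correct (arr : List Int) (tl : List Char) (n : Nat)
    (hn : n < arr.length) (ht : n ≤ tl.length)
    (h30 : 30 ≤ pvS arr (n+1)) (hmin : ∀ m < n, pvS arr (m+1) < 30) :
    ∀ fuel i msg, i ≤ n → n - i ≤ fuel →
      pvLoopA arr tl fuel (pvS arr (i+1)) i msg =
        (String.ofList (msg ++ (List.range' i (n - i)).map (fun j =>
            match tl[j]? with | some c => pvTc c | none => ' ')), arr.drop n) := by
  intro fuel
  induction fuel with
  | zero =>
      intro i msg hi hf
      have : i = n := by omega
      subst this
      simp [pvLoopA]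
  | succ fuel ih =>
      intro i msg hi hf
      by_cases hlt : i < n
      · have hcond : pvS arr (i+1) < 30 := hmin i hlt
        have hti : tl[i]? = some tl[i] := List.getElem?_eq_getElem (by omega)
        have hai : arr[i+1]? = some arr[i+1] := List.getElem?_eq_getElem (by omega)
        have hstep := ih (i+1) (msg ++ [pvTc tl[i]]) (by omega) (by omega)
        rw [pvS_succ arr (i+1) (by omega)] at hstep
        have hrange : List.range' i (n - i) = i :: List.range' (i+1) (n - (i+1)) := by
          have : n - i = (n - (i+1)) + 1 := by omega
          rw [this, List.range'_succ]
        simp only [pvLoopA, if_pos hcond, hti, hai, pvAbs_eq]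
        rw [hstep, hrange]
        simp [hti]
      · have : i = n := by omega
        subst this
        simp [pvLoopA, not_lt.mpr h30]

-- B's counting loop reaches exactly n from any i ≤ n
theorem pvCountB_correct (arr : List Int) (n : Nat)
    (hn : n < arr.length)
    (h30 : 30 ≤ pvS arr (n+1)) (hmin : ∀ m < n, pvS arr (m+1) < 30) :
    ∀ fuel i, i ≤ n → n - i ≤ fuel →
      pvCountB arr fuel (pvS arr (i+1)) i = n := by
  intro fuel
  induction fuel with
  | zero =>
      intro i hi hf
      have : i = n := by omega
      subst this
      simp [pvCountB]
  | succ fuel ih =>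
      intro i hi hf
      by_cases hlt : i < n
      · have hcond : pvS arr (i+1) < 30 := hmin i hlt
        have hai : arr[i+1]? = some arr[i+1] := List.getElem?_eq_getElem (by omega)
        have hstep := ih (i+1) (by omega) (by omega)
        rw [pvS_succ arr (i+1) (by omega)] at hstep
        simp only [pvCountB, if_pos hcond, hai]
        exact hstep
      · have : i = n := by omega
        subst this
        simp [pvCountB, not_lt.mpr h30]

-- ===== VERDICT (by name: the statement is the Claim_ definition above) =====
theorem return_text_message_spec : Claim_equal_return_text_message := by
  intro arr text _hdom hpre
  obtain ⟨n, hn, ht, h30, hmin⟩ := hpre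
  unfold Spec_return_text_message return_text_message return_text_message_alt
  have h0 : arr[0]? = some arr[0] := List.getElem?_eq_getElem (by omega)
  rw [h0]
  have hS1 : pvS arr 1 = |arr[0] - 3| := by
    rw [show (1 : Nat) = 0 + 1 from rfl, pvS_succ arr 0 (by omega)]
    simp [pvS]
  have ht' : n ≤ text.toList.length := by simpa using ht
  have hA := pvLoopA_correct arr text.toList n hn ht' h30 hmin arr.length 0 []
    (by omega) (by omega)
  have hB := pvCountB_correct arr n hn h30 hmin arr.length 0 (by omega) (by omega)
  simp only [pvAbs_eq, ← hS1] at *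
  rw [hA, hB]
  simp [List.range'_eq_map_range]
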